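-- pv_equiv track=rewrite | github.com/drizztSun/common_project | PythonLeetcode/leetcodeM/737_SentenceSimilarityII.py | doit_dfs
-- ===== SOURCE A (Python) =====
-- def doit_dfs(words1, words2, pairs):
--     from collections import defaultdict
--     if len(words1) != len(words2):
--         return False
--
--     graph = defaultdict(list)
--     for w1, w2 in pairs:
--         graph[w1].append(w2)
--         graph[w2].append(w1)
--
--     for w1, w2 in zip(words1, words2):
--         stack, seen = [w1], {w1}
--         while stack:
--             word = stack.pop()
--             if word == w2:
--                 break
--             for nei in graph[word]:
--                 if nei not in seen:
--                     seen.add(nei)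
--                     stack.append(nei)
--         else:
--             return False
--     return True
-- ===== SOURCE B (Python) =====
-- def doit_dfs(words1, words2, pairs):
--     # Build connected-component labels once (merge-by-relabel), then answer
--     # each word pair with two dict lookups.
--     if len(words1) != len(words2):
--         return False
--     comp = {}
--     for a, b in pairs:
--         ra = comp.get(a, a)
--         rb = comp.get(b, b)
--         comp[a] = ra
--         comp[b] = ra
--         if ra != rb:
--             comp = {k: (ra if v == rb else v) for k, v in comp.items()}
--     return all(comp.get(x, x) == comp.get(y, y) for x, y in zip(words1, words2))
-- ===== Notes on version B (the rewrite author's own statement) =====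
-- stated objective: alternative
-- what changed: A runs a stack-based DFS through the pair graph for every aligned word pair; B builds connected-component labels once by merge-by-relabel over the pairs and then answers each word pair with two dictionary lookups.
import Mathlib
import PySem

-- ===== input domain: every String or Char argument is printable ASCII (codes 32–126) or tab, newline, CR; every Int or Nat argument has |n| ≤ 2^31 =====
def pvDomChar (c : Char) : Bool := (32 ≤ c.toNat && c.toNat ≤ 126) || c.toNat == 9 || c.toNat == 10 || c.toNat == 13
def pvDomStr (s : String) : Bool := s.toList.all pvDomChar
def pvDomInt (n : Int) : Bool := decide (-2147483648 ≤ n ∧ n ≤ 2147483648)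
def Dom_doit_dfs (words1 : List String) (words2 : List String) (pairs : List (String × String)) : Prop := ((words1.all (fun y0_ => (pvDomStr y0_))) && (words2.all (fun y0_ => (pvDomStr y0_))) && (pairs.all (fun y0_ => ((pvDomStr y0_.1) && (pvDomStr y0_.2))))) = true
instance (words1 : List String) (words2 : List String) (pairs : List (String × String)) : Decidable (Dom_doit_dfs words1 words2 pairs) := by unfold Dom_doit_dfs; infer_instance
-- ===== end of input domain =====

-- B replaces A's per-word-pair DFS by one connected-component labelling pass over the
-- pairs followed by two dictionary lookups per word pair (objective: alternative).


-- ===== PORT A =====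
-- graph = defaultdict(list); for w1, w2 in pairs: graph[w1].append(w2); graph[w2].append(w1)
def pvBuildGraph (pairs : List (String × String)) : PySem.Dict String (List String) :=
  pairs.foldl (fun g p => (g.modify p.1 [] (· ++ [p.2])).modify p.2 [] (· ++ [p.1]))
    PySem.Dict.empty

-- graph[word] in A's loop body: a defaultdict read; the empty entry it may add is never
-- observed by any later read, so the port reads with default [].
def pvNeighbors (pairs : List (String × String)) (w : String) : List String :=
  (pvBuildGraph pairs).getD w []

-- all words occurring in pairs (used only as a termination measure for the DFS loop)
def pvUniv (pairs : List (String × String)) : PySem.Set String :=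
  PySem.Set.ofList (pairs.flatMap (fun p => [p.1, p.2]))

-- for nei in graph[word]: if nei not in seen: seen.add(nei); stack.append(nei)
-- (stack is kept top-first: Python appends to the end and pops from the end)
def pvPush : List String → PySem.Set String → List String → PySem.Set String × List String
  | [], seen, stack => (seen, stack)
  | n :: t, seen, stack =>
    if PySem.Set.contains seen n then pvPush t seen stack
    else pvPush t (PySem.Set.add seen n) (n :: stack)

def pvCnt (pairs : List (String × String)) (seen : PySem.Set String) : Nat :=
  ((pvUniv pairs).filter (fun u => !PySem.Set.contains seen u)).length

lemma pvFilterAnd_le (p : String → Bool) (n : String) :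
    ∀ t : List String,
      (t.filter (fun u => p u && !decide (u = n))).length ≤ (t.filter p).length := by
  intro t
  induction t with
  | nil => simp
  | cons u t ih =>
    by_cases h2 : u = n
    · subst h2
      by_cases h1 : p u = true <;> simp [h1] <;> omega
    · by_cases h1 : p u = true <;> simp [h1, h2] <;> omega

lemma pvFilterAnd_lt (p : String → Bool) (n : String) :
    ∀ t : List String, t.Nodup → n ∈ t → p n = true →
      (t.filter (fun u => p u && !decide (u = n))).length < (t.filter p).length := by
  intro t
  induction t with
  | nil => simp
  | cons u t ih =>
    intro hnd hmem hp
    simp only [List.nodup_cons] at hnd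
    by_cases h2 : u = n
    · subst h2
      have := pvFilterAnd_le p u t
      simp [hp]
      omega
    · have hmem' : n ∈ t := by
        rcases List.mem_cons.mp hmem with h | h
        · exact absurd h.symm h2
        · exact h
      have := ih hnd.2 hmem' hp
      by_cases h1 : p u = true <;> simp [h1, h2] <;> omega

lemma pvContains_add_fun (seen : PySem.Set String) (n : String) :
    (fun u => !PySem.Set.contains (PySem.Set.add seen n) u) =
    (fun u => (!PySem.Set.contains seen u) && !decide (u = n)) := by
  funext u
  by_cases h2 : u = n
  · subst h2; simp [PySem.Set.mem_add]
  · by_cases h1 : u ∈ seen <;> simp [PySem.Set.mem_add, h1, h2]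

lemma pvCnt_add_lt (pairs : List (String × String)) (seen : PySem.Set String) (n : String)
    (hn : n ∈ pvUniv pairs) (hns : ¬ n ∈ seen) :
    pvCnt pairs (PySem.Set.add seen n) < pvCnt pairs seen := by
  unfold pvCnt
  rw [pvContains_add_fun]
  exact pvFilterAnd_lt _ n _ (PySem.Set.nodup_ofList _) hn (by simp [hns])

lemma pvPush_measure (pairs : List (String × String)) :
    ∀ (ns : List String) (seen : PySem.Set String) (stack : List String),
      (∀ n ∈ ns, n ∈ pvUniv pairs) →
      2 * pvCnt pairs (pvPush ns seen stack).1 + (pvPush ns seen stack).2.length ≤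
        2 * pvCnt pairs seen + stack.length := by
  intro ns
  induction ns with
  | nil => intro seen stack h; simp [pvPush]
  | cons n t ih =>
    intro seen stack h
    by_cases hc : PySem.Set.contains seen n = true
    · simp only [pvPush, hc, if_true]
      exact ih seen stack (fun m hm => h m (List.mem_cons_of_mem _ hm))
    · have hns : ¬ n ∈ seen := by simpa using hc
      have hlt := pvCnt_add_lt pairs seen n (h n List.mem_cons_self) hns
      have hih := ih (PySem.Set.add seen n) (n :: stack)
        (fun m hm => h m (List.mem_cons_of_mem _ hm))
      have hc' : PySem.Set.contains seen n = false := by simpa using hc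
      simp only [pvPush, hc', Bool.false_eq_true, if_false]
      simp only [List.length_cons] at hih
      omega

-- x and y are linked by one of the (undirected) pairs
def pvStep (pairs : List (String × String)) (x y : String) : Prop :=
  (x, y) ∈ pairs ∨ (y, x) ∈ pairs

lemma pvNeighbors_iff (pairs : List (String × String)) (w n : String) :
    n ∈ pvNeighbors pairs w ↔ pvStep pairs w n := by
  induction pairs using List.reverseRecOn generalizing w n with
  | nil => simp [pvNeighbors, pvBuildGraph, pvStep, PySem.Dict.getD_empty]
  | append_singleton ps p ih =>
    simp only [pvNeighbors, pvBuildGraph, List.foldl_append, List.foldl_cons, List.foldl_nil]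
    simp only [PySem.Dict.getD_modify]
    have ih' := fun w n => ih w n
    simp only [pvNeighbors, pvBuildGraph] at ih'
    simp only [pvStep, List.mem_append, List.mem_singleton, Prod.ext_iff]
    split_ifs <;> simp_all [List.mem_append, pvStep] <;> tauto

lemma pvNeighbors_subset_univ (pairs : List (String × String)) (w : String) :
    ∀ n ∈ pvNeighbors pairs w, n ∈ pvUniv pairs := by
  intro n hn
  rw [pvNeighbors_iff] at hn
  simp only [pvUniv, PySem.Set.mem_ofList, List.mem_flatMap]
  rcases hn with h | h
  · exact ⟨(w, n), h, by simp⟩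
  · exact ⟨(n, w), h, by simp⟩

-- stack, seen = [w1], {w1}
-- while stack: word = stack.pop(); if word == w2: break; for nei in graph[word]: …
-- returns True iff the loop broke (w2 was popped), False on the loop's else branch
def pvDfs (pairs : List (String × String)) (w2 : String) :
    List String → PySem.Set String → Bool
  | [], _ => false
  | word :: rest, seen =>
    if word == w2 then true
    else
      let r := pvPush (pvNeighbors pairs word) seen rest
      pvDfs pairs w2 r.2 r.1
termination_by stack seen => 2 * pvCnt pairs seen + stack.length
decreasing_by
  have h := pvPush_measure pairs (pvNeighbors pairs word) seen rest
    (pvNeighbors_subset_univ pairs word)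
  simp only [List.length_cons]
  omega

-- for w1, w2 in zip(words1, words2): … else: return False   /   return True
def pvCheck (pairs : List (String × String)) : List (String × String) → Bool
  | [] => true
  | q :: rest =>
    if pvDfs pairs q.2 [q.1] (PySem.Set.ofList [q.1]) then pvCheck pairs rest else false

def doit_dfs (words1 : List String) (words2 : List String) (pairs : List (String × String)) : Bool :=
  if words1.length ≠ words2.length then false
  else pvCheck pairs (words1.zip words2)

-- ===== PORT B =====
-- one merge step of B's loop body:
--   ra = comp.get(a, a); rb = comp.get(b, b); comp[a] = ra; comp[b] = ra
--   if ra != rb: comp = {k: (ra if v == rb else v) for k, v in comp.items()}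
def pvMerge (comp : PySem.Dict String String) (p : String × String) : PySem.Dict String String :=
  let ra := comp.getD p.1 p.1
  let rb := comp.getD p.2 p.2
  let c2 := (comp.insert p.1 ra).insert p.2 ra
  if ra ≠ rb then
    PySem.Dict.mk (c2.items.map (fun q => (q.1, if q.2 = rb then ra else q.2)))
  else c2

def doit_dfs_alt (words1 : List String) (words2 : List String) (pairs : List (String × String)) : Bool :=
  if words1.length ≠ words2.length then false
  else
    let comp := pairs.foldl pvMerge PySem.Dict.empty
    (words1.zip words2).all (fun q => comp.getD q.1 q.1 == comp.getD q.2 q.2)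

-- ===== PRECONDITION & SPEC =====
def Spec_doit_dfs (words1 : List String) (words2 : List String) (pairs : List (String × String)) (out : Bool) : Prop := out = doit_dfs_alt words1 words2 pairs
instance (words1 : List String) (words2 : List String) (pairs : List (String × String)) (out : Bool) : Decidable (Spec_doit_dfs words1 words2 pairs out) := by unfold Spec_doit_dfs; infer_instance

-- ===== CLAIM (what is proved, stated in full; the proofs are below) =====
def Claim_equal_doit_dfs : Prop := ∀ (words1 : List String) (words2 : List String) (pairs : List (String × String)), Dom_doit_dfs words1 words2 pairs → Spec_doit_dfs words1 words2 pairs (doit_dfs words1 words2 pairs)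

-- ===== LEMMAS AND PROOFS =====

-- x and y are connected in the graph of the pairs
def pvConn (pairs : List (String × String)) : String → String → Prop :=
  Relation.ReflTransGen (pvStep pairs)

lemma pvConn_refl (pairs : List (String × String)) (x : String) : pvConn pairs x x :=
  Relation.ReflTransGen.refl

lemma pvConn_symm {pairs : List (String × String)} {x y : String}
    (h : pvConn pairs x y) : pvConn pairs y x := by
  have hsym : Symmetric (pvStep pairs) := fun u v huv => huv.symm
  exact Relation.ReflTransGen.symmetric hsym h

lemma pvConn_nil {x y : String} (h : pvConn [] x y) : x = y := by
  induction h with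
  | refl => rfl
  | tail _ hstep ih => rcases hstep with h | h <;> simp at h

lemma pvConn_mono {pairs : List (String × String)} (e : String × String) {x y : String}
    (h : pvConn pairs x y) : pvConn (pairs ++ [e]) x y := by
  refine Relation.ReflTransGen.mono ?_ h
  intro u v huv
  rcases huv with h | h
  · exact Or.inl (List.mem_append_left _ h)
  · exact Or.inr (List.mem_append_left _ h)

lemma pvConn_append_single {pairs : List (String × String)} {a b x y : String} :
    pvConn (pairs ++ [(a, b)]) x y ↔
      pvConn pairs x y ∨ (pvConn pairs x a ∧ pvConn pairs b y) ∨
        (pvConn pairs x b ∧ pvConn pairs a y) := by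
  constructor
  · intro h
    induction h with
    | refl => exact Or.inl Relation.ReflTransGen.refl
    | @tail c y hxc hstep ih =>
      have hstep' : pvStep pairs c y ∨ (c = a ∧ y = b) ∨ (c = b ∧ y = a) := by
        rcases hstep with h | h <;> rcases List.mem_append.mp h with h' | h'
        · exact Or.inl (Or.inl h')
        · simp only [List.mem_singleton, Prod.mk.injEq] at h'
          exact Or.inr (Or.inl ⟨h'.1, h'.2⟩)
        · exact Or.inl (Or.inr h')
        · simp only [List.mem_singleton, Prod.mk.injEq] at h'
          exact Or.inr (Or.inr ⟨h'.2, h'.1⟩)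
      rcases ih with ih | ⟨h1, h2⟩ | ⟨h1, h2⟩ <;>
        rcases hstep' with hs | ⟨rfl, rfl⟩ | ⟨rfl, rfl⟩
      · exact Or.inl (ih.tail hs)
      · exact Or.inr (Or.inl ⟨ih, Relation.ReflTransGen.refl⟩)
      · exact Or.inr (Or.inr ⟨ih, Relation.ReflTransGen.refl⟩)
      · exact Or.inr (Or.inl ⟨h1, h2.tail hs⟩)
      · exact Or.inl (h1.trans (pvConn_symm h2))
      · exact Or.inl h1
      · exact Or.inr (Or.inr ⟨h1, h2.tail hs⟩)
      · exact Or.inl h1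
      · exact Or.inl (h1.trans (pvConn_symm h2))
  · rintro (h | ⟨h1, h2⟩ | ⟨h1, h2⟩)
    · exact pvConn_mono _ h
    · exact ((pvConn_mono _ h1).tail (Or.inl (by simp))).trans (pvConn_mono _ h2)
    · exact ((pvConn_mono _ h1).tail (Or.inr (by simp))).trans (pvConn_mono _ h2)

-- ---- DFS-side correctness ----
lemma pvPush_mem_fst (x : String) :
    ∀ (ns : List String) (seen : PySem.Set String) (stack : List String),
      x ∈ (pvPush ns seen stack).1 ↔ x ∈ seen ∨ x ∈ ns := by
  intro ns
  induction ns with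
  | nil => intro seen stack; simp [pvPush]
  | cons n t ih =>
    intro seen stack
    by_cases hc : PySem.Set.contains seen n = true
    · have hn : n ∈ seen := by simpa using hc
      simp only [pvPush, hc, if_true]
      rw [ih]
      simp only [List.mem_cons]
      constructor
      · rintro (h | h)
        · exact Or.inl h
        · exact Or.inr (Or.inr h)
      · rintro (h | h | h)
        · exact Or.inl h
        · exact Or.inl (h ▸ hn)
        · exact Or.inr h
    · have hc' : PySem.Set.contains seen n = false := by simpa using hc
      simp only [pvPush, hc', Bool.false_eq_true, if_false]
      rw [ih]
      simp only [PySem.Set.mem_add, List.mem_cons]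
      tauto

lemma pvPush_mem_snd (x : String) :
    ∀ (ns : List String) (seen : PySem.Set String) (stack : List String),
      x ∈ (pvPush ns seen stack).2 → x ∈ stack ∨ x ∈ ns := by
  intro ns
  induction ns with
  | nil => intro seen stack h; exact Or.inl h
  | cons n t ih =>
    intro seen stack h
    by_cases hc : PySem.Set.contains seen n = true
    · simp only [pvPush, hc, if_true] at h
      rcases ih _ _ h with h' | h'
      · exact Or.inl h'
      · exact Or.inr (List.mem_cons_of_mem _ h')
    · have hc' : PySem.Set.contains seen n = false := by simpa using hc
      simp only [pvPush, hc', Bool.false_eq_true, if_false] at h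
      rcases ih _ _ h with h' | h'
      · rcases List.mem_cons.mp h' with rfl | h''
        · exact Or.inr List.mem_cons_self
        · exact Or.inl h''
      · exact Or.inr (List.mem_cons_of_mem _ h')

lemma pvPush_stack_mono (x : String) :
    ∀ (ns : List String) (seen : PySem.Set String) (stack : List String),
      x ∈ stack → x ∈ (pvPush ns seen stack).2 := by
  intro ns
  induction ns with
  | nil => intro seen stack h; simpa [pvPush] using h
  | cons n t ih =>
    intro seen stack h
    by_cases hc : PySem.Set.contains seen n = true
    · simp only [pvPush, hc, if_true]
      exact ih _ _ h
    · have hc' : PySem.Set.contains seen n = false := by simpa using hc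
      simp only [pvPush, hc', Bool.false_eq_true, if_false]
      exact ih _ _ (List.mem_cons_of_mem _ h)

lemma pvPush_covers (x : String) :
    ∀ (ns : List String) (seen : PySem.Set String) (stack : List String),
      x ∈ ns → x ∈ seen ∨ x ∈ (pvPush ns seen stack).2 := by
  intro ns
  induction ns with
  | nil => intro seen stack h; simp at h
  | cons n t ih =>
    intro seen stack h
    by_cases hc : PySem.Set.contains seen n = true
    · have hn : n ∈ seen := by simpa using hc
      simp only [pvPush, hc, if_true]
      rcases List.mem_cons.mp h with rfl | h'
      · exact Or.inl hn
      · exact ih _ _ h'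
    · have hc' : PySem.Set.contains seen n = false := by simpa using hc
      simp only [pvPush, hc', Bool.false_eq_true, if_false]
      rcases List.mem_cons.mp h with rfl | h'
      · exact Or.inr (pvPush_stack_mono x t _ _ List.mem_cons_self)
      · rcases ih (PySem.Set.add seen n) (n :: stack) h' with h'' | h''
        · rcases (by simpa [PySem.Set.mem_add] using h'' : x ∈ seen ∨ x = n) with h3 | h3
          · exact Or.inl h3
          · exact Or.inr (pvPush_stack_mono x t _ _ (by rw [h3]; exact List.mem_cons_self))
        · exact Or.inr h''

lemma pvDfs_sound (pairs : List (String × String)) (w1 w2 : String) :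
    ∀ (stack : List String) (seen : PySem.Set String),
      (∀ x ∈ stack, pvConn pairs w1 x) →
      pvDfs pairs w2 stack seen = true → pvConn pairs w1 w2 := by
  intro stack seen
  induction stack, seen using pvDfs.induct pairs w2 with
  | case1 seen => intro _ h; simp [pvDfs] at h
  | case2 word rest seen hw =>
    intro hstack _
    have hww : word = w2 := by simpa using hw
    exact hww ▸ hstack word List.mem_cons_self
  | case3 word rest seen hw _r ih =>
    intro hstack hrun
    simp only [pvDfs, hw, Bool.false_eq_true, if_false] at hrun
    apply ih
    · intro x hx
      rcases pvPush_mem_snd x (pvNeighbors pairs word) seen rest hx with h | h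
      · exact hstack x (List.mem_cons_of_mem _ h)
      · exact (hstack word List.mem_cons_self).tail ((pvNeighbors_iff pairs word x).mp h)
    · exact hrun

lemma pvClosed_not_reach (pairs : List (String × String)) (w2 : String)
    (S : PySem.Set String)
    (hclosed : ∀ x ∈ S, ∀ n, pvStep pairs x n → n ∈ S)
    (hne : ∀ x ∈ S, x ≠ w2) :
    ∀ y ∈ S, ¬ pvConn pairs y w2 := by
  have key : ∀ z, pvConn pairs z w2 → z ∈ S → False := by
    intro z h
    induction h using Relation.ReflTransGen.head_induction_on with
    | refl => intro hz; exact hne w2 hz rfl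
    | head hstep _ ih => intro hz; exact ih (hclosed _ hz _ hstep)
  exact fun y hy hconn => key y hconn hy

lemma pvDfs_complete (pairs : List (String × String)) (w2 : String) :
    ∀ (stack : List String) (seen : PySem.Set String),
      (∀ x ∈ stack, x ∈ seen) →
      (∀ x ∈ seen, x ∉ stack → x ≠ w2 ∧ ∀ n, pvStep pairs x n → n ∈ seen) →
      pvDfs pairs w2 stack seen = false →
      ∀ y ∈ seen, ¬ pvConn pairs y w2 := by
  intro stack seen
  induction stack, seen using pvDfs.induct pairs w2 with
  | case1 seen =>
    intro _ h2 _
    exact pvClosed_not_reach pairs w2 seen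
      (fun x hx n hs => (h2 x hx (by simp)).2 n hs)
      (fun x hx => (h2 x hx (by simp)).1)
  | case2 word rest seen hw =>
    intro _ _ hrun
    simp [pvDfs, hw] at hrun
  | case3 word rest seen hw _r ih =>
    intro h1 h2 hrun
    have hw' : word ≠ w2 := by simpa using hw
    simp only [pvDfs, hw, Bool.false_eq_true, if_false] at hrun
    have n1 : ∀ x ∈ (pvPush (pvNeighbors pairs word) seen rest).2,
        x ∈ (pvPush (pvNeighbors pairs word) seen rest).1 := by
      intro x hx
      rcases pvPush_mem_snd x _ _ _ hx with h | h
      · exact (pvPush_mem_fst x _ _ _).mpr (Or.inl (h1 x (List.mem_cons_of_mem _ h)))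
      · exact (pvPush_mem_fst x _ _ _).mpr (Or.inr h)
    have n2 : ∀ x ∈ (pvPush (pvNeighbors pairs word) seen rest).1,
        x ∉ (pvPush (pvNeighbors pairs word) seen rest).2 →
        x ≠ w2 ∧ ∀ n, pvStep pairs x n → n ∈ (pvPush (pvNeighbors pairs word) seen rest).1 := by
      intro x hx hnx
      by_cases hxs : x ∈ seen
      · by_cases hxw : x = word
        · subst hxw
          refine ⟨hw', fun n hstep => ?_⟩
          exact (pvPush_mem_fst n _ _ _).mpr (Or.inr ((pvNeighbors_iff pairs x n).mpr hstep))
        · have hxstack : x ∉ word :: rest := by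
            intro hmem
            rcases List.mem_cons.mp hmem with rfl | hmem'
            · exact hxw rfl
            · exact hnx (pvPush_stack_mono x _ _ _ hmem')
          obtain ⟨hne', hcl⟩ := h2 x hxs hxstack
          exact ⟨hne', fun n hstep => (pvPush_mem_fst n _ _ _).mpr (Or.inl (hcl n hstep))⟩
      · have hxn : x ∈ pvNeighbors pairs word := by
          rcases (pvPush_mem_fst x _ _ _).mp hx with h | h
          · exact absurd h hxs
          · exact h
        rcases pvPush_covers x (pvNeighbors pairs word) seen rest hxn with h | h
        · exact absurd h hxs
        · exact absurd h hnx
    have hall := ih n1 n2 hrun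
    intro y hy
    exact hall y ((pvPush_mem_fst y _ _ _).mpr (Or.inl hy))

lemma pvDfs_iff_conn (pairs : List (String × String)) (w1 w2 : String) :
    pvDfs pairs w2 [w1] (PySem.Set.ofList [w1]) = true ↔ pvConn pairs w1 w2 := by
  constructor
  · intro h
    refine pvDfs_sound pairs w1 w2 [w1] _ ?_ h
    intro x hx
    rcases List.mem_singleton.mp hx with rfl
    exact Relation.ReflTransGen.refl
  · intro hconn
    by_contra hfalse
    rw [Bool.not_eq_true] at hfalse
    have hmem : w1 ∈ PySem.Set.ofList [w1] := by simp [PySem.Set.mem_ofList]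
    refine pvDfs_complete pairs w2 [w1] (PySem.Set.ofList [w1]) ?_ ?_ hfalse w1 hmem hconn
    · intro x hx
      rcases List.mem_singleton.mp hx with rfl
      exact hmem
    · intro x hx hnx
      exfalso
      apply hnx
      have : x = w1 := by simpa [PySem.Set.mem_ofList] using hx
      simp [this]

-- ---- label-map-side correctness ----
def pvLab (c : PySem.Dict String String) (x : String) : String := c.getD x x

def pvInv (c : PySem.Dict String String) (P : List (String × String)) : Prop :=
  (∀ k v, c.get? k = some v → c.get? v = some v) ∧
  (∀ x y, pvLab c x = pvLab c y ↔ pvConn P x y)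

lemma pvGet?_mk_map (f : String → String) :
    ∀ (l : List (String × String)) (x : String),
      (PySem.Dict.mk (l.map (fun q => (q.1, f q.2)))).get? x = ((PySem.Dict.mk l).get? x).map f := by
  intro l
  induction l with
  | nil => intro x; rfl
  | cons q t ih =>
    intro x
    simp only [List.map_cons]
    rw [PySem.Dict.get?_mk_cons, PySem.Dict.get?_mk_cons]
    by_cases h : (q.1 == x) = true <;> simp [h, ih x]

lemma pvMerge_inv {c : PySem.Dict String String} {P : List (String × String)}
    (h : pvInv c P) (p : String × String) : pvInv (pvMerge c p) (P ++ [p]) := by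
  obtain ⟨a, b⟩ := p
  obtain ⟨hroots, hlab⟩ := h
  simp only [pvMerge]
  set ra := c.getD a a with hra
  set rb := c.getD b b with hrb
  set c2 := (c.insert a ra).insert b ra with hc2def
  have hget2 : ∀ x, c2.get? x = if x = b then some ra else if x = a then some ra else c.get? x := by
    intro x
    rw [hc2def, PySem.Dict.get?_insert, PySem.Dict.get?_insert]
  have hlaba : pvLab c a = ra := by rw [pvLab, ← hra]
  have hlabb : pvLab c b = rb := by rw [pvLab, ← hrb]
  have hra_root : c.get? ra = some ra ∨ ra = a := by
    rcases hcase : c.get? a with _ | w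
    · right; rw [hra, PySem.Dict.getD_eq_get?_getD, hcase]; rfl
    · left
      have hw : ra = w := by rw [hra, PySem.Dict.getD_eq_get?_getD, hcase]; rfl
      rw [hw]; exact hroots a w hcase
  have hrb_root : c.get? rb = some rb ∨ rb = b := by
    rcases hcase : c.get? b with _ | w
    · right; rw [hrb, PySem.Dict.getD_eq_get?_getD, hcase]; rfl
    · left
      have hw : rb = w := by rw [hrb, PySem.Dict.getD_eq_get?_getD, hcase]; rfl
      rw [hw]; exact hroots b w hcase
  have hc2ra : c2.get? ra = some ra := by
    rw [hget2]
    split_ifs with g1 g2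
    · rfl
    · rfl
    · rcases hra_root with h | h
      · exact h
      · exact absurd h g2
  have hc2rb : ∃ u, c2.get? rb = some u := by
    rw [hget2]
    split_ifs with g1 g2
    · exact ⟨ra, rfl⟩
    · exact ⟨ra, rfl⟩
    · rcases hrb_root with h | h
      · exact ⟨rb, h⟩
      · exact absurd h g1
  by_cases hne : ra = rb
  · -- classes of a and b already coincide: no relabel
    rw [if_neg (by simpa using hne)]
    have hConnab : pvConn P a b := (hlab a b).mp (by rw [hlaba, hlabb, hne])
    have hConnEq : ∀ x y, pvConn (P ++ [(a, b)]) x y ↔ pvConn P x y := by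
      intro x y
      rw [pvConn_append_single]
      constructor
      · rintro (h | ⟨h1, h2⟩ | ⟨h1, h2⟩)
        · exact h
        · exact h1.trans (hConnab.trans h2)
        · exact h1.trans ((pvConn_symm hConnab).trans h2)
      · exact Or.inl
    have hlab2 : ∀ x, pvLab c2 x = pvLab c x := by
      intro x
      rw [pvLab, PySem.Dict.getD_eq_get?_getD, hget2]
      split_ifs with g1 g2
      · subst g1; rw [hlabb, ← hne]; rfl
      · subst g2; rw [hlaba]; rfl
      · rw [pvLab, PySem.Dict.getD_eq_get?_getD]
    constructor
    · intro k v hk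
      rw [hget2] at hk
      split_ifs at hk with g1 g2
      · obtain rfl : ra = v := by injection hk
        exact hc2ra
      · obtain rfl : ra = v := by injection hk
        exact hc2ra
      · have hv := hroots k v hk
        rw [hget2]
        split_ifs with g3 g4
        · subst g3
          have : rb = v := by rw [hrb, PySem.Dict.getD_eq_get?_getD, hv]; rfl
          rw [hne, this]
        · subst g4
          have : ra = v := by rw [hra, PySem.Dict.getD_eq_get?_getD, hv]; rfl
          rw [this]
        · exact hv
    · intro x y
      rw [hlab2, hlab2, hConnEq]
      exact hlab x y
  · -- genuine merge: relabel the class of rb to ra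
    rw [if_pos hne]
    set f : String → String := fun v => if v = rb then ra else v with hf
    have hfra : f ra = ra := by rw [hf]; simp [hne]
    have hget3 : ∀ x, (PySem.Dict.mk (c2.items.map (fun q => (q.1, if q.2 = rb then ra else q.2)))).get? x
        = (c2.get? x).map f := by
      intro x
      exact pvGet?_mk_map f c2.items x
    have hlab3 : ∀ x, pvLab (PySem.Dict.mk (c2.items.map (fun q => (q.1, if q.2 = rb then ra else q.2)))) x
        = f (pvLab c x) := by
      intro x
      rw [pvLab, PySem.Dict.getD_eq_get?_getD, hget3]
      rcases h2x : c2.get? x with _ | v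
      · -- x is not a key: its label is x itself, and x ≠ rb
        have hx := hget2 x
        rw [h2x] at hx
        by_cases g1 : x = b
        · rw [if_pos g1] at hx; simp at hx
        · rw [if_neg g1] at hx
          by_cases g2 : x = a
          · rw [if_pos g2] at hx; simp at hx
          · rw [if_neg g2] at hx
            have hxrb : x ≠ rb := by
              intro hxeq
              obtain ⟨u, hu⟩ := hc2rb
              rw [hget2] at hu
              split_ifs at hu with g3 g4
              · exact g1 (hxeq.trans g3)
              · exact g2 (hxeq.trans g4)
              · rw [← hxeq, ← hx] at hu; simp at hu
            rw [pvLab, PySem.Dict.getD_eq_get?_getD, ← hx]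
            simp only [Option.map_none, Option.getD_none]
            rw [hf]; simp [hxrb]
      · rw [hget2] at h2x
        split_ifs at h2x with g1 g2
        · obtain rfl : ra = v := by injection h2x
          subst g1
          simp only [Option.map_some, Option.getD_some]
          rw [hlabb, hfra, hf]; simp
        · obtain rfl : ra = v := by injection h2x
          subst g2
          simp only [Option.map_some, Option.getD_some]
          rw [hlaba]
        · have hv : pvLab c x = v := by rw [pvLab, PySem.Dict.getD_eq_get?_getD, h2x]; rfl
          rw [hv]
          simp only [Option.map_some, Option.getD_some]
    constructor
    · -- roots are preserved by the relabelling
      intro k v hk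
      rw [hget3] at hk
      rcases h2k : c2.get? k with _ | w
      · rw [h2k] at hk; simp at hk
      · rw [h2k] at hk
        simp only [Option.map_some] at hk
        obtain rfl : f w = v := by injection hk
        rw [hget3]
        rw [hget2] at h2k
        split_ifs at h2k with g1 g2
        · obtain rfl : ra = w := by injection h2k
          rw [hfra, hc2ra, Option.map_some, hfra]
        · obtain rfl : ra = w := by injection h2k
          rw [hfra, hc2ra, Option.map_some, hfra]
        · have hw := hroots k w h2k
          by_cases hwrb : w = rb
          · subst hwrb
            have hfrb : f rb = ra := by rw [hf]; simp
            rw [hfrb, hc2ra, Option.map_some, hfra]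
          · have hfw : f w = w := by rw [hf]; simp [hwrb]
            rw [hfw]
            have hc2w : c2.get? w = some w ∨ c2.get? w = some ra := by
              rw [hget2]
              split_ifs with g3 g4
              · exact Or.inr rfl
              · exact Or.inr rfl
              · exact Or.inl hw
            rcases hc2w with h | h
            · rw [h, Option.map_some, hfw]
            · -- c2.get? w = some ra can only happen if w = a or w = b
              rw [hget2] at h
              split_ifs at h with g3 g4
              · -- w = b: then rb = pvLab c b = w, contradicting w ≠ rb
                exfalso
                apply hwrb
                subst g3
                rw [hrb, PySem.Dict.getD_eq_get?_getD, hw]; rfl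
              · -- w = a: then ra = w
                have hraw : ra = w := by
                  subst g4
                  rw [hra, PySem.Dict.getD_eq_get?_getD, hw]; rfl
                rw [← hraw, hc2ra, Option.map_some, hfra]
              · have hraw : ra = w := by
                  rw [hw] at h
                  injection h with hh
                  exact hh.symm
                rw [← hraw, hc2ra, Option.map_some, hfra]
    · intro x y
      rw [hlab3, hlab3, pvConn_append_single]
      have hfeq : ∀ u v : String, f u = f v ↔ (u = v ∨ (u = ra ∧ v = rb) ∨ (u = rb ∧ v = ra)) := by
        intro u v
        rw [hf]
        simp only []
        by_cases hu : u = rb <;> by_cases hv : v = rb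
        · subst hu; subst hv; simp
        · subst hu
          rw [if_pos rfl, if_neg hv]
          constructor
          · intro h; exact Or.inr (Or.inr ⟨rfl, h.symm⟩)
          · rintro (h | ⟨h1, h2⟩ | ⟨h1, h2⟩)
            · exact absurd h.symm hv
            · exact absurd h1.symm hne
            · exact h2.symm
        · subst hv
          rw [if_neg hu, if_pos rfl]
          constructor
          · intro h; exact Or.inr (Or.inl ⟨h, rfl⟩)
          · rintro (h | ⟨h1, h2⟩ | ⟨h1, h2⟩)
            · exact absurd h hu
            · exact h1
            · exact absurd h2.symm hne
        · rw [if_neg hu, if_neg hv]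
          constructor
          · exact Or.inl
          · rintro (h | ⟨h1, h2⟩ | ⟨h1, h2⟩)
            · exact h
            · exact absurd h2 hv
            · exact absurd h1 hu
      rw [hfeq]
      have e1 : pvConn P x y ↔ pvLab c x = pvLab c y := (hlab x y).symm
      have e2 : pvConn P x a ↔ pvLab c x = ra := by rw [← hlab x a, hlaba]
      have e3 : pvConn P b y ↔ pvLab c y = rb := by
        rw [← hlab b y, hlabb]
        exact ⟨fun h => h.symm, fun h => h.symm⟩
      have e4 : pvConn P x b ↔ pvLab c x = rb := by rw [← hlab x b, hlabb]
      have e5 : pvConn P a y ↔ pvLab c y = ra := by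
        rw [← hlab a y, hlaba]
        exact ⟨fun h => h.symm, fun h => h.symm⟩
      rw [e1, e2, e3, e4, e5]

lemma pvFoldl_inv :
    ∀ (ps : List (String × String)) (c : PySem.Dict String String) (P : List (String × String)),
      pvInv c P → pvInv (ps.foldl pvMerge c) (P ++ ps) := by
  intro ps
  induction ps with
  | nil => intro c P h; simpa using h
  | cons p t ih =>
    intro c P h
    have h1 := pvMerge_inv h p
    have h2 := ih (pvMerge c p) (P ++ [p]) h1
    rw [List.append_assoc] at h2
    simpa using h2

lemma pvInv_empty : pvInv PySem.Dict.empty [] := by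
  constructor
  · intro k v h
    rw [PySem.Dict.get?_empty] at h
    simp at h
  · intro x y
    simp only [pvLab, PySem.Dict.getD_empty]
    constructor
    · intro h; rw [h]; exact pvConn_refl [] y
    · exact pvConn_nil

-- ---- assembly ----
lemma pvCheck_eq_all (pairs : List (String × String)) (comp : PySem.Dict String String)
    (hinv : pvInv comp pairs) :
    ∀ l : List (String × String),
      pvCheck pairs l = l.all (fun q => comp.getD q.1 q.1 == comp.getD q.2 q.2) := by
  intro l
  induction l with
  | nil => simp [pvCheck]
  | cons q t ih =>
    have hq : pvDfs pairs q.2 [q.1] (PySem.Set.ofList [q.1])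
        = (comp.getD q.1 q.1 == comp.getD q.2 q.2) := by
      rw [Bool.eq_iff_iff, pvDfs_iff_conn, ← hinv.2 q.1 q.2, beq_iff_eq]
      exact Iff.rfl
    simp only [pvCheck, List.all_cons, hq, ih]
    cases comp.getD q.1 q.1 == comp.getD q.2 q.2 <;> simp

-- ===== VERDICT (by name: the statement is the Claim_ definition above) =====
theorem doit_dfs_spec : Claim_equal_doit_dfs := by
  intro words1 words2 pairs _
  unfold Spec_doit_dfs doit_dfs doit_dfs_alt
  by_cases hl : words1.length = words2.length
  · simp only [hl, ne_eq, not_true_eq_false, if_false]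
    have hinv : pvInv (pairs.foldl pvMerge PySem.Dict.empty) pairs := by
      have := pvFoldl_inv pairs PySem.Dict.empty [] pvInv_empty
      simpa using this
    exact pvCheck_eq_all pairs _ hinv (words1.zip words2)
  · simp [hl]
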